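-- pv_equiv track=rewrite | github.com/miliar/Code_Jam_Webscraper | Solutions_python/Problem_184/1401.py | removefours
-- ===== SOURCE A (Python) =====
-- def removefours(l):
--     i = l.count('U')
--     for j in range(i):
--         l.remove('F')
--         l.remove('O')
--         l.remove('U')
--         l.remove('R')
--     return i, l
-- ===== SOURCE B (Python) =====
-- def removefours(l):
--     i = l.count('U')
--     f = o = u = r = i
--     out = []
--     for x in l:
--         if x == 'F' and f:
--             f -= 1
--         elif x == 'O' and o:
--             o -= 1
--         elif x == 'U' and u:
--             u -= 1
--         elif x == 'R' and r:
--             r -= 1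
--         else:
--             out.append(x)
--     return i, out
-- ===== Notes on version B (the rewrite author's own statement) =====
-- stated objective: alternative
-- what changed: Replaces i rounds of four list.remove scans by a single pass that rebuilds the list while skipping the first i 'F'/'O'/'R' and all 'U' elements via four skip budgets; A mutates its argument in place, B does not (return value equivalence).
import Mathlib
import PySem

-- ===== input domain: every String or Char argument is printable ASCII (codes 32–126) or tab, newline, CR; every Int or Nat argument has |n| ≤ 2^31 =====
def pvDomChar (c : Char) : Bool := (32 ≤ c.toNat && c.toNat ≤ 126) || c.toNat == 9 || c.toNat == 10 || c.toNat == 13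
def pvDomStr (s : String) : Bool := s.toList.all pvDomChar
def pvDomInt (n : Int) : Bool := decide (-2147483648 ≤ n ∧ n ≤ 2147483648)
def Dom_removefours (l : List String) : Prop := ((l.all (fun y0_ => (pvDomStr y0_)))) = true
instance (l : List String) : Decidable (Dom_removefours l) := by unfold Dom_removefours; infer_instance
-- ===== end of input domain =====

-- B rebuilds the list in a single pass with four skip counters instead of A's i rounds of list.remove.
-- A mutates its argument in place, B does not; the equivalence proved here is about the RETURN value only.

-- ===== PORT A =====
def removefours (l : List String) : Int × List String :=
  let i : Nat := PySem.List.count l "U"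
  let st := (PySem.List.pyRange 0 (i : Int) 1).foldl
    (fun st _ =>
      (((st.bind (fun m => PySem.List.remove? m "F")).bind
         (fun m => PySem.List.remove? m "O")).bind
         (fun m => PySem.List.remove? m "U")).bind
         (fun m => PySem.List.remove? m "R"))
    (some l)
  ((i : Int), st.getD [])

-- ===== PORT B =====
def removefoursSkip : List String → Nat → Nat → Nat → Nat → List String
  | [], _, _, _, _ => []
  | x :: t, f, o, u, r =>
    if x = "F" ∧ f ≠ 0 then removefoursSkip t (f - 1) o u r
    else if x = "O" ∧ o ≠ 0 then removefoursSkip t f (o - 1) u r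
    else if x = "U" ∧ u ≠ 0 then removefoursSkip t f o (u - 1) r
    else if x = "R" ∧ r ≠ 0 then removefoursSkip t f o u (r - 1)
    else x :: removefoursSkip t f o u r

def removefours_alt (l : List String) : Int × List String :=
  let i : Nat := PySem.List.count l "U"
  ((i : Int), removefoursSkip l i i i i)

-- ===== PRECONDITION & SPEC =====
-- Pre_ excludes exactly the inputs on which A raises ValueError: those with fewer
-- 'F', 'O' or 'R' elements than 'U' elements (list.remove then fails).
def Pre_removefours (l : List String) : Prop :=
  l.count "U" ≤ l.count "F" ∧ l.count "U" ≤ l.count "O" ∧ l.count "U" ≤ l.count "R"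
instance (l : List String) : Decidable (Pre_removefours l) := by unfold Pre_removefours; infer_instance

def pvWitness_removefours : List String := ["x", "F", "U", "O", "R", "F", "y"]

def Spec_removefours (l : List String) (out : Int × List String) : Prop := out = removefours_alt l
instance (l : List String) (out : Int × List String) : Decidable (Spec_removefours l out) := by unfold Spec_removefours; infer_instance

-- ===== CLAIM (what is proved, stated in full; the proofs are below) =====
def Claim_equal_removefours : Prop := ∀ (l : List String), Dom_removefours l → Pre_removefours l → Spec_removefours l (removefours l)

-- ===== LEMMAS AND PROOFS =====

-- erase x applied n times
def eraseN (x : String) : Nat → List String → List String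
  | 0, l => l
  | n + 1, l => eraseN x n (l.erase x)

theorem eraseN_erase (x y : String) (n : Nat) (l : List String) :
    eraseN x n (l.erase y) = (eraseN x n l).erase y := by
  induction n generalizing l with
  | zero => rfl
  | succ n ih => simp [eraseN, List.erase_comm, ih]

theorem eraseN_cons_ne (x y : String) (h : y ≠ x) (n : Nat) (t : List String) :
    eraseN x n (y :: t) = y :: eraseN x n t := by
  induction n generalizing t with
  | zero => rfl
  | succ n ih =>
    have hx : (y == x) = false := beq_eq_false_iff_ne.mpr h
    simp [eraseN, hx, ih]

theorem eraseN_cons_pass (L x : String) (n : Nat) (h : ¬(x = L ∧ n ≠ 0)) (t : List String) :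
    eraseN L n (x :: t) = x :: eraseN L n t := by
  by_cases hx : x = L
  · have hn : n = 0 := by tauto
    subst hn; rfl
  · exact eraseN_cons_ne L x hx n t

theorem eraseN_cons_self' (x : String) {n : Nat} (h : n ≠ 0) (t : List String) :
    eraseN x n (x :: t) = eraseN x (n - 1) t := by
  cases n with
  | zero => exact absurd rfl h
  | succ n => simp [eraseN]

theorem eraseN_nil (x : String) (n : Nat) : eraseN x n [] = [] := by
  induction n with
  | zero => rfl
  | succ n ih => simpa [eraseN] using ih

-- the combined effect of the four budgets
def quad (f o u r : Nat) (l : List String) : List String :=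
  eraseN "F" f (eraseN "O" o (eraseN "U" u (eraseN "R" r l)))

theorem skip_eq_quad (l : List String) (f o u r : Nat) :
    removefoursSkip l f o u r = quad f o u r l := by
  induction l generalizing f o u r with
  | nil => simp [removefoursSkip, quad, eraseN_nil]
  | cons x t ih =>
    by_cases hF : x = "F" ∧ f ≠ 0
    · obtain ⟨rfl, hf⟩ := hF
      rw [removefoursSkip, if_pos ⟨rfl, hf⟩, ih]
      simp only [quad]
      rw [eraseN_cons_ne "R" "F" (by decide), eraseN_cons_ne "U" "F" (by decide),
        eraseN_cons_ne "O" "F" (by decide), eraseN_cons_self' "F" hf]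
    · by_cases hO : x = "O" ∧ o ≠ 0
      · obtain ⟨rfl, ho⟩ := hO
        rw [removefoursSkip, if_neg hF, if_pos ⟨rfl, ho⟩, ih]
        simp only [quad]
        rw [eraseN_cons_ne "R" "O" (by decide), eraseN_cons_ne "U" "O" (by decide),
          eraseN_cons_self' "O" ho]
      · by_cases hU : x = "U" ∧ u ≠ 0
        · obtain ⟨rfl, hu⟩ := hU
          rw [removefoursSkip, if_neg hF, if_neg hO, if_pos ⟨rfl, hu⟩, ih]
          simp only [quad]
          rw [eraseN_cons_ne "R" "U" (by decide), eraseN_cons_self' "U" hu]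
        · by_cases hR : x = "R" ∧ r ≠ 0
          · obtain ⟨rfl, hr⟩ := hR
            rw [removefoursSkip, if_neg hF, if_neg hO, if_neg hU, if_pos ⟨rfl, hr⟩, ih]
            simp only [quad]
            rw [eraseN_cons_self' "R" hr]
          · rw [removefoursSkip, if_neg hF, if_neg hO, if_neg hU, if_neg hR, ih]
            simp only [quad]
            rw [eraseN_cons_pass "R" x r hR, eraseN_cons_pass "U" x u hU,
              eraseN_cons_pass "O" x o hO, eraseN_cons_pass "F" x f hF]

def roundA (st : Option (List String)) : Option (List String) :=
  (((st.bind (fun m => PySem.List.remove? m "F")).bind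
     (fun m => PySem.List.remove? m "O")).bind
     (fun m => PySem.List.remove? m "U")).bind
     (fun m => PySem.List.remove? m "R")

theorem eraseN_succ (x : String) (n : Nat) (l : List String) :
    eraseN x n (l.erase x) = eraseN x (n + 1) l := rfl

theorem quad_succ (k : Nat) (l : List String) :
    quad k k k k ((((l.erase "F").erase "O").erase "U").erase "R")
      = quad (k + 1) (k + 1) (k + 1) (k + 1) l := by
  simp only [quad]
  rw [eraseN_succ "R" k (((l.erase "F").erase "O").erase "U"),
    eraseN_erase "R" "U" (k + 1) ((l.erase "F").erase "O"),
    eraseN_succ "U" k (eraseN "R" (k + 1) ((l.erase "F").erase "O")),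
    eraseN_erase "R" "O" (k + 1) (l.erase "F"),
    eraseN_erase "U" "O" (k + 1) (eraseN "R" (k + 1) (l.erase "F")),
    eraseN_succ "O" k (eraseN "U" (k + 1) (eraseN "R" (k + 1) (l.erase "F"))),
    eraseN_erase "R" "F" (k + 1) l,
    eraseN_erase "U" "F" (k + 1) (eraseN "R" (k + 1) l),
    eraseN_erase "O" "F" (k + 1) (eraseN "U" (k + 1) (eraseN "R" (k + 1) l)),
    eraseN_succ "F" k (eraseN "O" (k + 1) (eraseN "U" (k + 1) (eraseN "R" (k + 1) l)))]

-- one successful round of the four removes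
theorem round_some (l : List String)
    (hf : l.count "F" ≠ 0) (ho : l.count "O" ≠ 0) (hu : l.count "U" ≠ 0) (hr : l.count "R" ≠ 0) :
    roundA (some l) = some ((((l.erase "F").erase "O").erase "U").erase "R") := by
  have hF : "F" ∈ l := List.count_pos_iff.mp (Nat.pos_of_ne_zero hf)
  have hO : "O" ∈ l.erase "F" := by
    rw [← List.count_pos_iff, List.count_erase_of_ne (by decide)]; omega
  have hU : "U" ∈ (l.erase "F").erase "O" := by
    rw [← List.count_pos_iff, List.count_erase_of_ne (by decide),
      List.count_erase_of_ne (by decide)]; omega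
  have hR : "R" ∈ ((l.erase "F").erase "O").erase "U" := by
    rw [← List.count_pos_iff, List.count_erase_of_ne (by decide),
      List.count_erase_of_ne (by decide), List.count_erase_of_ne (by decide)]; omega
  unfold roundA
  simp only [Option.bind_some]
  rw [PySem.List.remove?_eq_some_erase l "F" hF]
  simp only [Option.bind_some]
  rw [PySem.List.remove?_eq_some_erase _ "O" hO]
  simp only [Option.bind_some]
  rw [PySem.List.remove?_eq_some_erase _ "U" hU]
  simp only [Option.bind_some]
  rw [PySem.List.remove?_eq_some_erase _ "R" hR]

theorem foldl_const {α β : Type} (g : α → α) (xs : List β) (init : α) :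
    xs.foldl (fun st _ => g st) init = g^[xs.length] init := by
  induction xs generalizing init with
  | nil => rfl
  | cons x xs ih => simp [List.foldl_cons, ih, Function.iterate_succ_apply]

theorem iterA (k : Nat) (l : List String)
    (hf : k ≤ l.count "F") (ho : k ≤ l.count "O") (hu : k ≤ l.count "U") (hr : k ≤ l.count "R") :
    roundA^[k] (some l) = some (quad k k k k l) := by
  induction k generalizing l with
  | zero => rfl
  | succ k ih =>
    rw [Function.iterate_succ_apply,
      round_some l (by omega) (by omega) (by omega) (by omega)]
    have cF : ((((l.erase "F").erase "O").erase "U").erase "R").count "F" = l.count "F" - 1 := by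
      rw [List.count_erase_of_ne (by decide), List.count_erase_of_ne (by decide),
        List.count_erase_of_ne (by decide), List.count_erase_self]
    have cO : ((((l.erase "F").erase "O").erase "U").erase "R").count "O" = l.count "O" - 1 := by
      rw [List.count_erase_of_ne (by decide), List.count_erase_of_ne (by decide),
        List.count_erase_self, List.count_erase_of_ne (by decide)]
    have cU : ((((l.erase "F").erase "O").erase "U").erase "R").count "U" = l.count "U" - 1 := by
      rw [List.count_erase_of_ne (by decide), List.count_erase_self,
        List.count_erase_of_ne (by decide), List.count_erase_of_ne (by decide)]
    have cR : ((((l.erase "F").erase "O").erase "U").erase "R").count "R" = l.count "R" - 1 := by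
      rw [List.count_erase_self, List.count_erase_of_ne (by decide),
        List.count_erase_of_ne (by decide), List.count_erase_of_ne (by decide)]
    rw [ih _ (by omega) (by omega) (by omega) (by omega), quad_succ]

theorem removefours_spec : Claim_equal_removefours := by
  intro l _ pre
  unfold Spec_removefours removefours removefours_alt
  obtain ⟨hf, ho, hr⟩ := pre
  have hc : PySem.List.count l "U" = l.count "U" := PySem.List.count_eq l "U"
  simp only []
  rw [show (fun (st : Option (List String)) (_ : Int) =>
      (((st.bind (fun m => PySem.List.remove? m "F")).bind
         (fun m => PySem.List.remove? m "O")).bind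
         (fun m => PySem.List.remove? m "U")).bind
         (fun m => PySem.List.remove? m "R")) = (fun st _ => roundA st) from rfl]
  rw [foldl_const roundA]
  rw [PySem.List.length_pyRange_one]
  rw [show ((PySem.List.count l "U" : Int) - 0).toNat = PySem.List.count l "U" by omega]
  rw [iterA (PySem.List.count l "U") l (by omega) (by omega) (by omega) (by omega)]
  rw [skip_eq_quad]
  simp
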